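-- pv_equiv track=rewrite | github.com/huan-zhang/tweet-generator | image_generator.py | _clean_story_for_prompt
-- ===== SOURCE A (Python) =====
-- def _clean_story_for_prompt(story: str) -> str:
--     """Clean the story for use in image generation prompts."""
--     # Remove hashtags and extra whitespace
--     lines = story.split('\n')
--     clean_lines = []
--
--     for line in lines:
--         if not line.strip().startswith('#'):
--             clean_lines.append(line.strip())
--
--     clean_story = ' '.join(clean_lines).strip()
--
--     # Remove hashtags that might be at the end
--     words = clean_story.split()
--     filtered_words = [word for word in words if not word.startswith('#')]
--
--     return ' '.join(filtered_words)
-- ===== SOURCE B (Python) =====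
-- def _clean_story_for_prompt(story: str) -> str:
--     """Clean the story for use in image generation prompts (single pass, no re-split)."""
--     tokens = []
--     for line in story.split('\n'):
--         if line.strip().startswith('#'):
--             continue
--         tokens.extend(w for w in line.split() if not w.startswith('#'))
--     return ' '.join(tokens)
-- ===== Notes on version B (the rewrite author's own statement) =====
-- stated objective: simpler
-- what changed: One pass over the split lines extending a token list per line, instead of building stripped lines, joining them into an intermediate string, stripping it, re-splitting it into words and filtering.
import Mathlib
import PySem

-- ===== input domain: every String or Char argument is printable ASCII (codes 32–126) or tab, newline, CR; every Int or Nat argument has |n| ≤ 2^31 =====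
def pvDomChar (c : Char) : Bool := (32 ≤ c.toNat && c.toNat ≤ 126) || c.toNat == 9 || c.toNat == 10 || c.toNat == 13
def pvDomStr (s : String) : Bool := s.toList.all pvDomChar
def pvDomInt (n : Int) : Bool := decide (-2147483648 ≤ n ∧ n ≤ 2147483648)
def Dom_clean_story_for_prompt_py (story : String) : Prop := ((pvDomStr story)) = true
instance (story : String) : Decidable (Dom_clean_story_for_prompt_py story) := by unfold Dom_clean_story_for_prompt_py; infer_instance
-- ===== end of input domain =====

-- B collapses A's two passes (strip-and-join lines, then re-split and filter words) into one
-- pass over the split lines that extends a running token list; objective: simpler.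


-- ===== PORT A =====
def clean_story_for_prompt_py (story : String) : String :=
  -- story.split('\n'): sep is the nonempty literal "\n", so Str.split? is always `some`
  let lines : List String := (PySem.Str.split? story "\n").getD []
  let clean_lines : List String :=
    lines.foldl (fun acc line =>
      if !(PySem.Str.startswith (PySem.Str.strip line) "#") then acc ++ [PySem.Str.strip line]
      else acc) []
  let clean_story : String := PySem.Str.strip (PySem.Str.join " " clean_lines)
  let words : List String := PySem.Str.split₀ clean_story
  let filtered_words : List String := words.filter (fun word => !(PySem.Str.startswith word "#"))
  PySem.Str.join " " filtered_words

-- ===== PORT B =====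
def clean_story_for_prompt_py_alt (story : String) : String :=
  let tokens : List String :=
    ((PySem.Str.split? story "\n").getD []).foldl (fun acc line =>
      if PySem.Str.startswith (PySem.Str.strip line) "#" then acc
      else acc ++ (PySem.Str.split₀ line).filter (fun w => !(PySem.Str.startswith w "#"))) []
  PySem.Str.join " " tokens

-- ===== PRECONDITION & SPEC =====
def Spec_clean_story_for_prompt_py (story : String) (out : String) : Prop := out = clean_story_for_prompt_py_alt story
instance (story : String) (out : String) : Decidable (Spec_clean_story_for_prompt_py story out) := by unfold Spec_clean_story_for_prompt_py; infer_instance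

-- ===== CLAIM (what is proved, stated in full; the proofs are below) =====
def Claim_equal_clean_story_for_prompt_py : Prop := ∀ (story : String), Dom_clean_story_for_prompt_py story → Spec_clean_story_for_prompt_py story (clean_story_for_prompt_py story)

-- ===== LEMMAS AND PROOFS =====

-- go with a non-empty accumulator = the accumulated words (reversed) followed by a fresh run
theorem pv_go_acc (s : List Char) (cur : List Char) (acc : List (List Char)) :
    PySem.Chars.split₀.go s cur acc = acc.reverse ++ PySem.Chars.split₀.go s cur [] := by
  induction s generalizing cur acc with
  | nil => simp [PySem.Chars.split₀.go]; split_ifs <;> simp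
  | cons c rest ih =>
    simp only [PySem.Chars.split₀.go]
    split_ifs with h1 h2
    · exact ih [] acc
    · rw [ih [] (cur.reverse :: acc), ih [] [cur.reverse]]; simp
    · exact ih (c :: cur) acc

-- a whitespace character splits the word scan: words of (s ++ c :: t) = words of s ++ words of t
theorem pv_go_space_append (c : Char) (hc : PySem.Chars.isspace c = true)
    (s t : List Char) (cur : List Char) (acc : List (List Char)) :
    PySem.Chars.split₀.go (s ++ c :: t) cur acc
      = PySem.Chars.split₀.go s cur acc ++ PySem.Chars.split₀.go t [] [] := by
  induction s generalizing cur acc with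
  | nil =>
    simp only [List.nil_append, PySem.Chars.split₀.go, hc, if_pos]
    split_ifs with h
    · exact pv_go_acc t [] acc
    · rw [pv_go_acc t [] (cur.reverse :: acc)]
  | cons d rest ih =>
    simp only [List.cons_append, PySem.Chars.split₀.go]
    split_ifs with h1 h2
    · exact ih [] acc
    · rw [ih [] (cur.reverse :: acc)]
    · exact ih (d :: cur) acc

theorem pv_split₀_allspace (s : List Char) (h : ∀ c ∈ s, PySem.Chars.isspace c = true) :
    PySem.Chars.split₀ s = [] := by
  unfold PySem.Chars.split₀
  induction s with
  | nil => simp [PySem.Chars.split₀.go]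
  | cons c rest ih =>
    simp only [PySem.Chars.split₀.go, h c (List.mem_cons_self), if_pos, List.isEmpty_nil]
    exact ih (fun d hd => h d (List.mem_cons_of_mem _ hd))

theorem pv_split₀_append_space (s t : List Char) (h : ∀ c ∈ t, PySem.Chars.isspace c = true) :
    PySem.Chars.split₀ (s ++ t) = PySem.Chars.split₀ s := by
  cases t with
  | nil => simp
  | cons c rest =>
    unfold PySem.Chars.split₀
    rw [pv_go_space_append c (h c (List.mem_cons_self)) s rest [] []]
    have : PySem.Chars.split₀.go rest [] [] = [] :=
      pv_split₀_allspace rest (fun d hd => h d (List.mem_cons_of_mem _ hd))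
    simp [this]

theorem pv_split₀_lstrip (s : List Char) :
    PySem.Chars.split₀ (PySem.Chars.lstrip s) = PySem.Chars.split₀ s := by
  unfold PySem.Chars.lstrip
  induction s with
  | nil => rfl
  | cons c rest ih =>
    by_cases h : PySem.Chars.isspace c = true
    · rw [List.dropWhile_cons_of_pos h, ih]
      unfold PySem.Chars.split₀
      simp [PySem.Chars.split₀.go, h]
    · rw [List.dropWhile_cons_of_neg (by simp [h])]

theorem pv_split₀_strip (s : List Char) :
    PySem.Chars.split₀ (PySem.Chars.strip s) = PySem.Chars.split₀ s := by
  unfold PySem.Chars.strip PySem.Chars.rstrip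
  rw [← pv_split₀_lstrip s]
  have hdecomp : PySem.Chars.lstrip s
      = (List.dropWhile PySem.Chars.isspace (PySem.Chars.lstrip s).reverse).reverse
        ++ (List.takeWhile PySem.Chars.isspace (PySem.Chars.lstrip s).reverse).reverse := by
    rw [← List.reverse_append, List.takeWhile_append_dropWhile, List.reverse_reverse]
  conv_rhs => rw [hdecomp]
  rw [pv_split₀_append_space]
  intro c hc
  rw [List.mem_reverse] at hc
  exact List.mem_takeWhile_imp hc

theorem pv_split₀_join_space (L : List (List Char)) :
    PySem.Chars.split₀ (PySem.Chars.join [' '] L) = L.flatMap PySem.Chars.split₀ := by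
  induction L with
  | nil => rfl
  | cons x rest ih =>
    cases rest with
    | nil => simp [PySem.Chars.join, List.intercalate]
    | cons y ys =>
      have hj : PySem.Chars.join [' '] (x :: y :: ys) = x ++ ' ' :: PySem.Chars.join [' '] (y :: ys) := by
        simp [PySem.Chars.join, List.intercalate]
      rw [hj]
      unfold PySem.Chars.split₀
      rw [pv_go_space_append ' ' (by decide) x (PySem.Chars.join [' '] (y :: ys)) [] []]
      unfold PySem.Chars.split₀ at ih
      rw [ih]; simp

-- B's loop shape: conditional extend-by-a-block is flatMap over the kept elements
theorem pv_foldl_if_flatMap {α β : Type} (q : α → Bool) (g : α → List β)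
    (l : List α) (acc : List β) :
    l.foldl (fun acc x => if q x then acc else acc ++ g x) acc
      = acc ++ (l.filter (fun x => !q x)).flatMap g := by
  induction l generalizing acc with
  | nil => simp
  | cons x rest ih =>
    by_cases h : q x = true
    · simp [h, ih]
    · simp only [List.foldl_cons, List.filter_cons, h]
      rw [ih]
      simp

-- Chars-level core: A's filter-after-rejoin equals the per-line flatMap of filtered words
theorem pv_chars_main (F : List (List Char)) :
    (PySem.Chars.split₀ (PySem.Chars.strip (PySem.Chars.join [' '] (F.map PySem.Chars.strip)))).filter
        (fun w => !(PySem.Chars.startswith w ['#']))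
      = F.flatMap (fun l => (PySem.Chars.split₀ l).filter (fun w => !(PySem.Chars.startswith w ['#']))) := by
  rw [pv_split₀_strip, pv_split₀_join_space, List.filter_flatMap, List.flatMap_map]
  congr 1
  funext l
  rw [pv_split₀_strip]

set_option maxHeartbeats 1000000 in
theorem pv_lines_eq (lines : List String) :
    PySem.Str.join " "
      ((PySem.Str.split₀ (PySem.Str.strip (PySem.Str.join " "
        (lines.foldl (fun acc line =>
          if !(PySem.Str.startswith (PySem.Str.strip line) "#") then acc ++ [PySem.Str.strip line]
          else acc) [])))).filter (fun word => !(PySem.Str.startswith word "#")))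
    = PySem.Str.join " "
      (lines.foldl (fun acc line =>
        if PySem.Str.startswith (PySem.Str.strip line) "#" then acc
        else acc ++ (PySem.Str.split₀ line).filter (fun w => !(PySem.Str.startswith w "#"))) []) := by
  refine String.toList_inj.mp ?_
  rw [PySem.List.foldl_append_if (fun line => !(PySem.Str.startswith (PySem.Str.strip line) "#"))
        PySem.Str.strip lines []]
  rw [pv_foldl_if_flatMap (fun line => PySem.Str.startswith (PySem.Str.strip line) "#")
        (fun line => (PySem.Str.split₀ line).filter (fun w => !(PySem.Str.startswith w "#"))) lines []]
  simp only [List.nil_append, PySem.Str.toList_join]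
  apply congrArg
  set F := lines.filter (fun line => !(PySem.Str.startswith (PySem.Str.strip line) "#")) with hF
  have hpred : (fun word => !(PySem.Str.startswith word "#"))
      = (fun cs => !(PySem.Chars.startswith cs ['#'])) ∘ String.toList := by
    funext w; simp [PySem.Str.startswith_eq]
  calc (((PySem.Str.split₀ (PySem.Str.strip (PySem.Str.join " " (F.map PySem.Str.strip)))).filter
            (fun word => !(PySem.Str.startswith word "#"))).map String.toList)
      = ((PySem.Str.split₀ (PySem.Str.strip (PySem.Str.join " " (F.map PySem.Str.strip)))).map
            String.toList).filter (fun cs => !(PySem.Chars.startswith cs ['#'])) := by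
        rw [List.filter_map, ← hpred]
    _ = (PySem.Chars.split₀ (PySem.Chars.strip (PySem.Chars.join [' ']
            ((F.map String.toList).map PySem.Chars.strip)))).filter
            (fun cs => !(PySem.Chars.startswith cs ['#'])) := by
        rw [PySem.Str.split₀_map_toList, PySem.Str.toList_strip, PySem.Str.toList_join]
        rw [show (" " : String).toList = [' '] from rfl]
        rw [List.map_map]
        rw [show (String.toList ∘ PySem.Str.strip) = (PySem.Chars.strip ∘ String.toList) from
              funext (fun l => PySem.Str.toList_strip l), ← List.map_map]
    _ = (F.map String.toList).flatMap
            (fun l => (PySem.Chars.split₀ l).filter (fun w => !(PySem.Chars.startswith w ['#']))) :=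
        pv_chars_main (F.map String.toList)
    _ = (F.flatMap (fun line => (PySem.Str.split₀ line).filter
            (fun w => !(PySem.Str.startswith w "#")))).map String.toList := by
        rw [List.map_flatMap, List.flatMap_map]
        congr 1
        funext l
        rw [hpred, ← List.filter_map, PySem.Str.split₀_map_toList]

-- ===== VERDICT (by name: the statement is the Claim_ definition above) =====
theorem clean_story_for_prompt_py_spec : Claim_equal_clean_story_for_prompt_py := by
  intro story _
  unfold Spec_clean_story_for_prompt_py
  show clean_story_for_prompt_py story = clean_story_for_prompt_py_alt story
  simp only [clean_story_for_prompt_py, clean_story_for_prompt_py_alt]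
  exact pv_lines_eq ((PySem.Str.split? story "\n").getD [])
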